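-- pv_equiv track=rewrite | github.com/krishabh-95/rishabh_coding_history | Python_programs/pile.py | is_piling_possible
-- ===== SOURCE A (Python) =====
-- def is_piling_possible(arr, n):
--     i=0
--     is_possible=True
--
--     final_list=[]
--
--     while i<n:
--         if arr[i] < arr[n-1-i]:
--             final_list.append(arr[n-1-i])
--             arr.pop(n-1-i)
--         else:
--             final_list.append(arr[i])
--             arr.pop(i)
--
--         if len(final_list)>1:
--             if final_list[len(final_list)-1]>final_list[len(final_list)-2]:
--                 is_possible=False
--                 break
--         n=len(arr)
--
--     return is_possible
-- ===== SOURCE B (Python) =====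
-- def is_piling_possible(arr, n):
--     # Two-pointer scan from both ends tracking the previously taken value; no pops.
--     # (Unlike A, does not mutate arr; equivalence is about the return value.)
--     lo, hi = 0, n - 1
--     prev = None
--     while lo <= hi:
--         if arr[lo] < arr[hi]:
--             take = arr[hi]
--             hi -= 1
--         else:
--             take = arr[lo]
--             lo += 1
--         if prev is not None and take > prev:
--             return False
--         prev = take
--     return True
-- ===== Notes on version B (the rewrite author's own statement) =====
-- stated objective: faster
-- what changed: A repeatedly pops an end of the (mutated) list and appends to a growing final_list, re-reading len(arr) each round; B scans the untouched list with two index pointers and a single 'previously taken' value, so no list is ever copied, popped or appended.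
-- outside the precondition, e.g. on is_piling_possible([5, 1, 9], 2): A returns False, B returns True
import Mathlib
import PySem

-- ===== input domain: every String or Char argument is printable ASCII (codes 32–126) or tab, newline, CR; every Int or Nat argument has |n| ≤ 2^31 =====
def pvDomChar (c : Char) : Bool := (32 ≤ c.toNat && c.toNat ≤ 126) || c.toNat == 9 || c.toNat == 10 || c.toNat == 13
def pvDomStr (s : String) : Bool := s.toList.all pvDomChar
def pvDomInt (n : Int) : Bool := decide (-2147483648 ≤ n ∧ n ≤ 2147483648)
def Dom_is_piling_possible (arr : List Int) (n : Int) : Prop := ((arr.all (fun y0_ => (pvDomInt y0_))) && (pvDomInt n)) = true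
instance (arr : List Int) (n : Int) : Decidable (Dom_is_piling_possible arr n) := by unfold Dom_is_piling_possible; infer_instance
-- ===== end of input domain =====

-- B replaces A's repeated end-pops on a mutated list by a two-pointer scan tracking the previously
-- taken value (O(n) instead of O(n^2)); A mutates arr in place, B does not — the equivalence proved
-- here is about the return value only.

-- ===== PORT A =====
-- A's while-loop: i stays 0 forever; each iteration pops one end of arr, appends it to final_list,
-- checks the last two appended values, and resets n to len(arr). Fuel arr.length+1 bounds the
-- iterations (under Pre_ each iteration removes one element).
def pileLoopA (fuel : Nat) (i : Int) (arr : List Int) (n : Int)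
    (finalList : List Int) (isPossible : Bool) : Bool :=
  match fuel with
  | 0 => isPossible
  | Nat.succ f =>
    if i < n then
      match PySem.List.pyGet? arr i, PySem.List.pyGet? arr (n - 1 - i) with
      | some ai, some aj =>
        -- (new final_list, new arr) after the append + pop of this iteration
        let st : List Int × List Int :=
          if ai < aj then
            (finalList ++ [aj], ((PySem.List.pop? arr (n - 1 - i)).map Prod.snd).getD arr)
          else
            (finalList ++ [ai], ((PySem.List.pop? arr i).map Prod.snd).getD arr)
        if PySem.List.len st.1 > 1 then
          if PySem.List.pyGetD st.1 (PySem.List.len st.1 - 1) 0 >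
             PySem.List.pyGetD st.1 (PySem.List.len st.1 - 2) 0 then
            false  -- is_possible = False; break
          else
            pileLoopA f i st.2 (PySem.List.len st.2) st.1 isPossible
        else
          pileLoopA f i st.2 (PySem.List.len st.2) st.1 isPossible
      | _, _ => isPossible  -- IndexError in Python; excluded by Pre_
    else isPossible

def is_piling_possible (arr : List Int) (n : Int) : Bool :=
  pileLoopA (arr.length + 1) 0 arr n [] true

-- ===== PORT B =====
-- B's while-loop: two pointers lo, hi into the untouched arr, prev = previously taken value.
def pileLoopB (fuel : Nat) (arr : List Int) (lo hi : Int) (prev : Option Int) : Bool :=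
  match fuel with
  | 0 => true
  | Nat.succ f =>
    if lo ≤ hi then
      match PySem.List.pyGet? arr lo, PySem.List.pyGet? arr hi with
      | some al, some ah =>
        -- (take, new lo, new hi)
        let st : Int × Int × Int := if al < ah then (ah, lo, hi - 1) else (al, lo + 1, hi)
        match prev with
        | some p => if st.1 > p then false else pileLoopB f arr st.2.1 st.2.2 (some st.1)
        | none => pileLoopB f arr st.2.1 st.2.2 (some st.1)
      | _, _ => true  -- unreachable while 0 ≤ lo ≤ hi < len arr
    else true

def is_piling_possible_alt (arr : List Int) (n : Int) : Bool :=
  pileLoopB (arr.length + 1) arr 0 (n - 1) none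

-- ===== PRECONDITION & SPEC =====
-- Pre_ restricts to the function's natural domain, n = len(arr) (plus the trivially-agreeing n ≤ 0,
-- where A's loop never runs): for n > len(arr) A raises IndexError, and for 0 < n < len(arr) A mixes
-- the stated n with the true length, an accident of its index arithmetic outside the contract that
-- n is the array's length.
def Pre_is_piling_possible (arr : List Int) (n : Int) : Prop :=
  n = arr.length ∨ n ≤ 0
instance (arr : List Int) (n : Int) : Decidable (Pre_is_piling_possible arr n) := by
  unfold Pre_is_piling_possible; infer_instance

def pvWitness_is_piling_possible : List Int × Int := ([3, 1, 2], 3)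

def Spec_is_piling_possible (arr : List Int) (n : Int) (out : Bool) : Prop := out = is_piling_possible_alt arr n
instance (arr : List Int) (n : Int) (out : Bool) : Decidable (Spec_is_piling_possible arr n out) := by unfold Spec_is_piling_possible; infer_instance

-- ===== CLAIM (what is proved, stated in full; the proofs are below) =====
def Claim_equal_is_piling_possible : Prop := ∀ (arr : List Int) (n : Int), Dom_is_piling_possible arr n → Pre_is_piling_possible arr n → Spec_is_piling_possible arr n (is_piling_possible arr n)

-- ===== LEMMAS AND PROOFS =====

-- RHS of one loop step of B (proof-side abbreviation of the match on prev in pileLoopB's body)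
def pileCheckRHS (f : Nat) (arr : List Int) (lo' hi' x : Int) (prev : Option Int) : Bool :=
  match prev with
  | some p => if x > p then false else pileLoopB f arr lo' hi' (some x)
  | none => pileLoopB f arr lo' hi' (some x)

-- After appending the taken value x, A's check on the last two elements of final_list is
-- B's check of x against prev (= finalL's last element).
lemma pile_check_eq (f : Nat) (arr finalL seg' : List Int) (prev : Option Int) (x lo' hi' : Int)
    (hlast : finalL.getLast? = prev)
    (hrec : pileLoopA f 0 seg' (seg'.length : Int) (finalL ++ [x]) true
              = pileLoopB f arr lo' hi' (some x)) :
    (if PySem.List.len (finalL ++ [x]) > 1 then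
        if PySem.List.pyGetD (finalL ++ [x]) (PySem.List.len (finalL ++ [x]) - 1) 0 >
           PySem.List.pyGetD (finalL ++ [x]) (PySem.List.len (finalL ++ [x]) - 2) 0 then false
        else pileLoopA f 0 seg' (PySem.List.len seg') (finalL ++ [x]) true
      else pileLoopA f 0 seg' (PySem.List.len seg') (finalL ++ [x]) true) =
    pileCheckRHS f arr lo' hi' x prev := by
  cases prev with
  | none =>
    have hnil : finalL = [] := List.getLast?_eq_none_iff.mp hlast
    subst hnil
    simpa [pileCheckRHS, PySem.List.len_eq] using hrec
  | some p =>
    have hne : finalL ≠ [] := by intro h; rw [h] at hlast; simp at hlast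
    have hlen : 1 ≤ finalL.length := by
      cases finalL
      · exact absurd rfl hne
      · simp
    have g1 : (finalL ++ [x])[finalL.length]? = some x := List.getElem?_concat_length ..
    have g2 : (finalL ++ [x])[finalL.length - 1]? = some p := by
      rw [List.getElem?_append_left (by omega), ← List.getLast?_eq_getElem?]; exact hlast
    have e1 : PySem.List.pyGetD (finalL ++ [x]) (PySem.List.len (finalL ++ [x]) - 1) 0 = x := by
      have h : PySem.List.len (finalL ++ [x]) - 1 = ((finalL.length : Nat) : Int) := by
        simp [PySem.List.len_eq]
      rw [h, PySem.List.pyGetD_natCast, List.getD_eq_getElem?_getD, g1]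
      rfl
    have e2 : PySem.List.pyGetD (finalL ++ [x]) (PySem.List.len (finalL ++ [x]) - 2) 0 = p := by
      have h : PySem.List.len (finalL ++ [x]) - 2 = (((finalL.length - 1 : Nat)) : Int) := by
        simp [PySem.List.len_eq]; omega
      rw [h, PySem.List.pyGetD_natCast, List.getD_eq_getElem?_getD, g2]
      rfl
    have hgt : PySem.List.len (finalL ++ [x]) > 1 := by simp [PySem.List.len_eq]; omega
    rw [if_pos hgt, e1, e2]
    by_cases hxp : x > p
    · simp [pileCheckRHS, hxp]
    · simp only [pileCheckRHS, if_neg hxp]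
      simpa [PySem.List.len_eq] using hrec

-- The two loops agree: A's current list is exactly the window arr[lo..hi] of B's untouched list,
-- A's final_list's last element is B's prev.

-- (l.take n).tail, needed to shift the window's left edge
lemma pile_take_tail (l : List Int) (n : Nat) : (l.take n).tail = l.tail.take (n - 1) := by
  induction l with
  | nil => simp
  | cons a t _ => cases n <;> simp

lemma pile_loop_eq (fuel : Nat) :
    ∀ (arr : List Int) (lo hi : Int) (finalL : List Int) (prev : Option Int),
      0 ≤ lo → lo ≤ hi + 1 → hi < (arr.length : Int) →
      finalL.getLast? = prev →
      pileLoopA fuel 0 ((arr.drop lo.toNat).take (hi + 1 - lo).toNat)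
        (((arr.drop lo.toNat).take (hi + 1 - lo).toNat).length : Int) finalL true
        = pileLoopB fuel arr lo hi prev := by
  induction fuel with
  | zero => intro arr lo hi finalL prev _ _ _ _; rfl
  | succ f ih =>
    intro arr lo hi finalL prev hlo hlohi hhi hlast
    set seg := (arr.drop lo.toNat).take (hi + 1 - lo).toNat with hseg
    have hseglen : seg.length = (hi + 1 - lo).toNat := by
      rw [hseg, List.length_take, List.length_drop]; omega
    by_cases hcmp : lo ≤ hi
    · have hlt : lo.toNat < arr.length := by omega
      have hht : hi.toNat < arr.length := by omega
      have hsegpos : 0 < seg.length := by omega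
      have hhead : seg[0]'hsegpos = arr[lo.toNat]'hlt := by
        simp [hseg, List.getElem_take, List.getElem_drop]
      have hlastel : seg[(hi - lo).toNat]'(by omega) = arr[hi.toNat]'hht := by
        simp only [hseg, List.getElem_take, List.getElem_drop]
        congr 1; omega
      have hA0 : PySem.List.pyGet? seg 0 = some (arr[lo.toNat]'hlt) := by
        rw [PySem.List.pyGet?_zero, List.getElem?_eq_getElem hsegpos, hhead]
      have hA1 : PySem.List.pyGet? seg ((seg.length : Int) - 1 - 0) = some (arr[hi.toNat]'hht) := by
        have h : ((seg.length : Int) - 1 - 0) = (((hi - lo).toNat : Nat) : Int) := by omega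
        rw [h, PySem.List.pyGet?_natCast, List.getElem?_eq_getElem (by omega), hlastel]
      have hB0 : PySem.List.pyGet? arr lo = some (arr[lo.toNat]'hlt) :=
        PySem.List.pyGet?_eq_some_getElem arr hlo (by omega)
      have hB1 : PySem.List.pyGet? arr hi = some (arr[hi.toNat]'hht) :=
        PySem.List.pyGet?_eq_some_getElem arr (by omega) (by omega)
      have hpopLast : ((PySem.List.pop? seg ((seg.length : Int) - 1 - 0)).map Prod.snd).getD seg
          = seg.dropLast := by
        have h : ((seg.length : Int) - 1 - 0) = (((seg.length - 1 : Nat)) : Int) := by omega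
        rw [h, PySem.List.pop?_natCast seg (seg.length - 1) (by omega)]
        simp [List.eraseIdx_length_sub_one]
      have hpopZero : ((PySem.List.pop? seg (0 : Int)).map Prod.snd).getD seg = seg.tail := by
        have h : (0 : Int) = (((0 : Nat)) : Int) := by norm_num
        rw [h, PySem.List.pop?_natCast seg 0 (by omega)]
        simp [List.eraseIdx_zero]
      have hwinLast : seg.dropLast = (arr.drop lo.toNat).take ((hi - 1) + 1 - lo).toNat := by
        rw [List.dropLast_eq_take, hseglen, hseg, List.take_take]
        congr 1; omega
      have hwinHead : seg.tail = (arr.drop (lo + 1).toNat).take (hi + 1 - (lo + 1)).toNat := by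
        rw [hseg, pile_take_tail, List.tail_drop]
        have h1 : lo.toNat + 1 = (lo + 1).toNat := by omega
        have h2 : (hi + 1 - lo).toNat - 1 = (hi + 1 - (lo + 1)).toNat := by omega
        rw [h1, h2]
      simp only [pileLoopA, pileLoopB]
      rw [if_pos (show (0 : Int) < (seg.length : Int) by exact_mod_cast hsegpos),
          if_pos hcmp, hA0, hA1, hB0, hB1]
      by_cases hc : arr[lo.toNat]'hlt < arr[hi.toNat]'hht
      · simp only [if_pos hc, hpopLast]
        refine pile_check_eq f arr finalL seg.dropLast prev (arr[hi.toNat]'hht) lo (hi - 1) hlast ?_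
        rw [hwinLast]
        exact ih arr lo (hi - 1) (finalL ++ [arr[hi.toNat]'hht]) (some (arr[hi.toNat]'hht))
          hlo (by omega) (by omega) List.getLast?_concat
      · simp only [if_neg hc, hpopZero]
        refine pile_check_eq f arr finalL seg.tail prev (arr[lo.toNat]'hlt) (lo + 1) hi hlast ?_
        rw [hwinHead]
        exact ih arr (lo + 1) hi (finalL ++ [arr[lo.toNat]'hlt]) (some (arr[lo.toNat]'hlt))
          (by omega) (by omega) (by omega) List.getLast?_concat
    · have h0 : ¬ ((0 : Int) < (seg.length : Int)) := by
        have : seg.length = 0 := by omega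
        omega
      simp only [pileLoopA, pileLoopB]
      rw [if_neg h0, if_neg hcmp]

-- ===== VERDICT (by name: the statement is the Claim_ definition above) =====
theorem is_piling_possible_spec : Claim_equal_is_piling_possible := by
  intro arr n hdom hpre
  unfold Spec_is_piling_possible is_piling_possible is_piling_possible_alt
  rcases hpre with h | h
  · subst h
    have := pile_loop_eq (arr.length + 1) arr 0 ((arr.length : Int) - 1) [] none
      (by omega) (by omega) (by omega) rfl
    simpa using this
  · -- n ≤ 0: neither loop body runs
    cases arr.length + 1 with
    | zero => simp [pileLoopA, pileLoopB]
    | succ f =>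
      simp only [pileLoopA, pileLoopB]
      rw [if_neg (by omega), if_neg (by omega)]
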